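-- pv_equiv track=rewrite | github.com/learn-kodkod/exercises | first_test.py | sort_by_severity
-- ===== SOURCE A (Python) =====
-- def sort_by_severity(logs_dicts: list[dict]) -> list[dict]:
--
--     error_list = []
--     warn_list = []
--     info_lst = []
--     for log_dict in logs_dicts:
--         if log_dict["level"] == "ERROR":
--             error_list.append(log_dict)
--         elif log_dict["level"] == "WARN":
--             warn_list.append(log_dict)
--         elif log_dict["level"] == "INFO":
--             info_lst.append(log_dict)
--     return error_list + warn_list + info_lst
-- ===== SOURCE B (Python) =====
-- _RANK = {"ERROR": 0, "WARN": 1, "INFO": 2}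
--
-- def sort_by_severity(logs_dicts: list[dict]) -> list[dict]:
--     filtered = [d for d in logs_dicts if d["level"] in _RANK]
--     return sorted(filtered, key=lambda d: _RANK[d["level"]])
-- ===== Notes on version B (the rewrite author's own statement) =====
-- stated objective: idiomatic
-- what changed: Replaced the three-bucket single-pass partition with a filter by a rank table followed by a stable keyed sort (sorted with key=rank[level]), whose stability reproduces the original order within each severity.
import Mathlib
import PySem

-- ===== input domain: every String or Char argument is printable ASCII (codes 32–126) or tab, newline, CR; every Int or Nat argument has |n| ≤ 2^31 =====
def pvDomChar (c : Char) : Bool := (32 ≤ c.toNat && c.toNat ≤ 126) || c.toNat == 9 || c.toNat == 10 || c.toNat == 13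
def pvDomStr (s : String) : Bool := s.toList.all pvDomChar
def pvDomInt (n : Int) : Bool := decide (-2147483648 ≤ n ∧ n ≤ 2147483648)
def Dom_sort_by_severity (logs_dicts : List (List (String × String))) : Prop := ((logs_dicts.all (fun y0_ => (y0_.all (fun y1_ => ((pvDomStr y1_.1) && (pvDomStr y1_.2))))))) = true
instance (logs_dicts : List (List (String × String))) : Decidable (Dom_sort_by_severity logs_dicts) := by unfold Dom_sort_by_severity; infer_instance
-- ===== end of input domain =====

-- B replaces A's single-pass three-bucket partition with filter-by-rank-table + stable keyed sort; objective: idiomatic.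

-- ===== PORT A =====
-- d["level"] (shared accessor); under Pre_ every dict has the key, so the default "" is never returned
def pvLevel (d : List (String × String)) : String := (List.lookup "level" d).getD ""

def sort_by_severity (logs_dicts : List (List (String × String))) : List (List (String × String)) :=
  let r := logs_dicts.foldl
    (fun (acc : List (List (String × String)) × List (List (String × String)) × List (List (String × String))) d =>
      if pvLevel d = "ERROR" then (acc.1 ++ [d], acc.2.1, acc.2.2)
      else if pvLevel d = "WARN" then (acc.1, acc.2.1 ++ [d], acc.2.2)
      else if pvLevel d = "INFO" then (acc.1, acc.2.1, acc.2.2 ++ [d])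
      else acc)
    ([], [], [])
  r.1 ++ r.2.1 ++ r.2.2

-- ===== PORT B =====
def pvRank : PySem.Dict String Int := PySem.Dict.ofList [("ERROR", 0), ("WARN", 1), ("INFO", 2)]

def sort_by_severity_alt (logs_dicts : List (List (String × String))) : List (List (String × String)) :=
  let filtered := logs_dicts.filter (fun d => pvRank.contains (pvLevel d))
  PySem.List.sorted filtered (fun d => pvRank.getD (pvLevel d) 0) false

-- ===== PRECONDITION & SPEC =====
-- Pre_ excludes inputs where some dict lacks the key "level": there Python A (and Python B) raise KeyError.
def Pre_sort_by_severity (logs_dicts : List (List (String × String))) : Prop :=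
  ∀ d ∈ logs_dicts, (List.lookup "level" d).isSome = true
instance (logs_dicts : List (List (String × String))) : Decidable (Pre_sort_by_severity logs_dicts) := by unfold Pre_sort_by_severity; infer_instance

def pvWitness_sort_by_severity : (List (List (String × String))) :=
  [[("level", "INFO"), ("msg", "a")], [("level", "ERROR"), ("msg", "b")], [("level", "WARN")], [("level", "ERROR")]]

def Spec_sort_by_severity (logs_dicts : List (List (String × String))) (out : List (List (String × String))) : Prop := out = sort_by_severity_alt logs_dicts
instance (logs_dicts : List (List (String × String))) (out : List (List (String × String))) : Decidable (Spec_sort_by_severity logs_dicts out) := by unfold Spec_sort_by_severity; infer_instance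

-- ===== CLAIM (what is proved, stated in full; the proofs are below) =====
def Claim_equal_sort_by_severity : Prop := ∀ (logs_dicts : List (List (String × String))), Dom_sort_by_severity logs_dicts → Pre_sort_by_severity logs_dicts → Spec_sort_by_severity logs_dicts (sort_by_severity logs_dicts)

-- ===== LEMMAS AND PROOFS =====

-- stable insertion into a list already split as "not-before x" ++ "before x" lands x in the middle
theorem pv_insertBy_mid {α : Type} (before : α → α → Bool) (x : α) (l1 l2 : List α)
    (h1 : ∀ y ∈ l1, before x y = false) (h2 : ∀ y ∈ l2, before x y = true) :
    PySem.List.insertBy before x (l1 ++ l2) = l1 ++ x :: l2 := by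
  induction l1 with
  | nil =>
    cases l2 with
    | nil => simp [PySem.List.insertBy]
    | cons y t => simp [PySem.List.insertBy, h2 y (by simp)]
  | cons a t ih =>
    simp only [List.cons_append, PySem.List.insertBy, h1 a (by simp)]
    simp [ih (fun y hy => h1 y (by simp [hy]))]

-- a stable sort by a {0,1,2}-valued key is the concatenation of the three filters, in input order
theorem pv_sorted_tri {α : Type} (xs : List α) (key : α → Int)
    (h : ∀ x ∈ xs, key x = 0 ∨ key x = 1 ∨ key x = 2) :
    PySem.List.sorted xs key false =
      xs.filter (fun x => key x == 0) ++ xs.filter (fun x => key x == 1) ++ xs.filter (fun x => key x == 2) := by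
  induction xs using List.reverseRecOn with
  | nil => simp [PySem.List.sorted_eq_foldl_insertBy]
  | append_singleton xs x ih =>
    have hx : key x = 0 ∨ key x = 1 ∨ key x = 2 := h x (by simp)
    have hxs : ∀ y ∈ xs, key y = 0 ∨ key y = 1 ∨ key y = 2 := fun y hy => h y (by simp [hy])
    rw [PySem.List.sorted_eq_foldl_insertBy, List.foldl_append] at *
    simp only [List.foldl_cons, List.foldl_nil]
    rw [ih hxs]
    have f0 := fun y (hy : y ∈ xs.filter (fun x => key x == 0)) => (List.mem_filter.mp hy).2
    have f1 := fun y (hy : y ∈ xs.filter (fun x => key x == 1)) => (List.mem_filter.mp hy).2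
    have f2 := fun y (hy : y ∈ xs.filter (fun x => key x == 2)) => (List.mem_filter.mp hy).2
    rcases hx with hk | hk | hk
    · rw [show (xs.filter (fun x => key x == 0) ++ xs.filter (fun x => key x == 1) ++ xs.filter (fun x => key x == 2))
            = xs.filter (fun x => key x == 0) ++ (xs.filter (fun x => key x == 1) ++ xs.filter (fun x => key x == 2)) by simp]
      rw [pv_insertBy_mid _ x _ _
        (fun y hy => by have := f0 y hy; simp at this; simp [hk, this])
        (fun y hy => by
          rcases List.mem_append.mp hy with hy1 | hy2
          · have := f1 y hy1; simp at this; simp [hk, this]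
          · have := f2 y hy2; simp at this; simp [hk, this])]
      simp [List.filter_append, hk]
    · rw [show (xs.filter (fun x => key x == 0) ++ xs.filter (fun x => key x == 1) ++ xs.filter (fun x => key x == 2))
            = (xs.filter (fun x => key x == 0) ++ xs.filter (fun x => key x == 1)) ++ xs.filter (fun x => key x == 2) by simp]
      rw [pv_insertBy_mid _ x _ _
        (fun y hy => by
          rcases List.mem_append.mp hy with hy1 | hy2
          · have := f0 y hy1; simp at this; simp [hk, this]
          · have := f1 y hy2; simp at this; simp [hk, this])
        (fun y hy => by have := f2 y hy; simp at this; simp [hk, this])]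
      simp [List.filter_append, hk]
    · rw [PySem.List.insertBy_of_forall_not_before _ x _
        (fun y hy => by
          rcases List.mem_append.mp hy with hy' | hy2
          · rcases List.mem_append.mp hy' with hy0 | hy1
            · have := f0 y hy0; simp at this; simp [hk, this]
            · have := f1 y hy1; simp at this; simp [hk, this]
          · have := f2 y hy2; simp at this; simp [hk, this])]
      simp [List.filter_append, hk]

-- A's loop, with general accumulators: it appends the three filters
theorem pv_foldlA (logs : List (List (String × String)))
    (e w i : List (List (String × String))) :
    logs.foldl
      (fun (acc : List (List (String × String)) × List (List (String × String)) × List (List (String × String))) d =>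
        if pvLevel d = "ERROR" then (acc.1 ++ [d], acc.2.1, acc.2.2)
        else if pvLevel d = "WARN" then (acc.1, acc.2.1 ++ [d], acc.2.2)
        else if pvLevel d = "INFO" then (acc.1, acc.2.1, acc.2.2 ++ [d])
        else acc) (e, w, i)
    = (e ++ logs.filter (fun d => pvLevel d == "ERROR"),
       w ++ logs.filter (fun d => pvLevel d == "WARN"),
       i ++ logs.filter (fun d => pvLevel d == "INFO")) := by
  induction logs generalizing e w i with
  | nil => simp
  | cons d t ih =>
    by_cases h0 : pvLevel d = "ERROR"
    · simp [h0, ih]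
    · by_cases h1 : pvLevel d = "WARN"
      · simp [h1, ih]
      · by_cases h2 : pvLevel d = "INFO"
        · simp [h2, ih]
        · simp [h0, h1, h2, ih]

-- the rank-table membership/lookup spelled out on an arbitrary level string
theorem pv_contains_rank (lv : String) :
    pvRank.contains lv = (lv == "ERROR" || lv == "WARN" || lv == "INFO") := by
  by_cases h0 : lv = "ERROR"
  · subst h0; decide
  · by_cases h1 : lv = "WARN"
    · subst h1; decide
    · by_cases h2 : lv = "INFO"
      · subst h2; decide
      · have hd : pvRank = PySem.Dict.mk [("ERROR", (0:Int)), ("WARN", 1), ("INFO", 2)] := by decide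
        apply Bool.eq_iff_iff.mpr
        simp [hd, h0, h1, h2]
        exact ⟨fun h => h0 h.symm, fun h => h1 h.symm, fun h => h2 h.symm⟩

theorem pv_getD_rank (lv : String) :
    pvRank.getD lv 0 = (if lv = "ERROR" then 0 else if lv = "WARN" then 1 else if lv = "INFO" then 2 else 0) := by
  by_cases h0 : lv = "ERROR"
  · subst h0; decide
  · by_cases h1 : lv = "WARN"
    · subst h1; decide
    · by_cases h2 : lv = "INFO"
      · subst h2; decide
      · have hd : pvRank = PySem.Dict.mk [("ERROR", (0:Int)), ("WARN", 1), ("INFO", 2)] := by decide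
        have e0 : ¬"ERROR" = lv := fun h => h0 h.symm
        have e1 : ¬"WARN" = lv := fun h => h1 h.symm
        have e2 : ¬"INFO" = lv := fun h => h2 h.symm
        simp [hd, PySem.Dict.getD, PySem.Dict.get?, e0, e1, e2, h1, h2]

-- ===== VERDICT (by name: the statement is the Claim_ definition above) =====
theorem sort_by_severity_spec : Claim_equal_sort_by_severity := by
  intro logs _ _
  unfold Spec_sort_by_severity
  unfold sort_by_severity sort_by_severity_alt
  simp only [pv_foldlA, List.nil_append]
  set key : List (String × String) → Int := fun d => pvRank.getD (pvLevel d) 0 with hkey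
  have hmem : ∀ x ∈ logs.filter (fun d => pvRank.contains (pvLevel d)), key x = 0 ∨ key x = 1 ∨ key x = 2 := by
    intro x hx
    have := (List.mem_filter.mp hx).2
    rw [pv_contains_rank] at this
    simp only [hkey, pv_getD_rank]
    rcases (by simpa using this : (pvLevel x = "ERROR" ∨ pvLevel x = "WARN") ∨ pvLevel x = "INFO") with (h | h) | h <;> simp [h]
  rw [pv_sorted_tri _ key hmem]
  congr 1
  · congr 1
    · rw [List.filter_filter]
      apply List.filter_congr
      intro d _
      rw [pv_contains_rank]
      simp only [hkey, pv_getD_rank, pvLevel, pvLevel]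
      apply Bool.eq_iff_iff.mpr
      by_cases h0 : (List.lookup "level" d).getD "" = "ERROR"
      · simp [h0]
      · by_cases h1 : (List.lookup "level" d).getD "" = "WARN"
        · simp [h1]
        · by_cases h2 : (List.lookup "level" d).getD "" = "INFO"
          · simp [h2]
          · simp [h0, h1, h2]
    · rw [List.filter_filter]
      apply List.filter_congr
      intro d _
      rw [pv_contains_rank]
      simp only [hkey, pv_getD_rank, pvLevel, pvLevel]
      apply Bool.eq_iff_iff.mpr
      by_cases h0 : (List.lookup "level" d).getD "" = "ERROR"
      · simp [h0]
      · by_cases h1 : (List.lookup "level" d).getD "" = "WARN"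
        · simp [h1]
        · by_cases h2 : (List.lookup "level" d).getD "" = "INFO"
          · simp [h2]
          · simp [h0, h1, h2]
  · rw [List.filter_filter]
    apply List.filter_congr
    intro d _
    rw [pv_contains_rank]
    simp only [hkey, pv_getD_rank, pvLevel, pvLevel]
    apply Bool.eq_iff_iff.mpr
    by_cases h0 : (List.lookup "level" d).getD "" = "ERROR"
    · simp [h0]
    · by_cases h1 : (List.lookup "level" d).getD "" = "WARN"
      · simp [h1]
      · by_cases h2 : (List.lookup "level" d).getD "" = "INFO"
        · simp [h2]
        · simp [h0, h1, h2]
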